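-- pv_equiv track=rewrite | github.com/julnpires/EP2_2026.1 | questao11.py/funcoes.py | calcula_pontos_quadra
-- ===== SOURCE A (Python) =====
-- def calcula_pontos_quadra(lista):
--     for dado in lista:
--         contador = 0
--         for numero in lista:
--             if numero == dado:
--                 contador += 1
--         if contador >= 4:
--             soma = 0
--             for numero in lista:
--                 soma += numero
--             return soma
--     return 0
-- ===== SOURCE B (Python) =====
-- def calcula_pontos_quadra(lista):
--     total = sum(lista)
--     prev = None
--     run = 0
--     for x in sorted(lista):
--         if run and x == prev:
--             run += 1
--         else:
--             prev = x
--             run = 1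
--         if run >= 4:
--             return total
--     return 0
-- ===== Notes on version B (the rewrite author's own statement) =====
-- stated objective: faster
-- what changed: Replaced A's nested re-count of every element by sorting a copy of the list and making one linear run-length scan over consecutive equal values, returning the precomputed sum when a run reaches 4.
import Mathlib
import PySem

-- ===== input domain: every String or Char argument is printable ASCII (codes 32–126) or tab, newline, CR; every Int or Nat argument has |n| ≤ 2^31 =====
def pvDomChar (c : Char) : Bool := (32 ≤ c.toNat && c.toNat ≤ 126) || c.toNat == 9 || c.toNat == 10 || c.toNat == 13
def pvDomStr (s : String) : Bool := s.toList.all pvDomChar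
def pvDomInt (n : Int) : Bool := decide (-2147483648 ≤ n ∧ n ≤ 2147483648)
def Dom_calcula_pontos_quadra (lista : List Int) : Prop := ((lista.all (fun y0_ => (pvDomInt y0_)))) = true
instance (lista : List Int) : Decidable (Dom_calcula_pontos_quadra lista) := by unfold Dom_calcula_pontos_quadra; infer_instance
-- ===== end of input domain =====

-- B sorts a copy of the list and does one run-length scan over consecutive equal values (faster).

-- ===== PORT A =====
-- outer loop of A: for each remaining `dado`, count its occurrences in the full list;
-- on the first with count ≥ 4, sum the list by a loop and return; else return 0.
def calcAOuter (lista : List Int) : List Int → Int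
  | [] => 0
  | dado :: rest =>
    let contador := lista.foldl (fun c numero => if numero == dado then c + 1 else c) (0 : Int)
    if contador ≥ 4 then lista.foldl (fun soma numero => soma + numero) (0 : Int)
    else calcAOuter lista rest

def calcula_pontos_quadra (lista : List Int) : Int := calcAOuter lista lista

-- ===== PORT B =====
-- B's loop over sorted(lista), state (prev, run); returns total as soon as run reaches 4.
def calcBScan (total : Int) : List Int → Option Int → Int → Int
  | [], _, _ => 0
  | x :: xs, prev, run =>
    let prev' := if run ≠ 0 ∧ prev = some x then prev else some x
    let run'  := if run ≠ 0 ∧ prev = some x then run + 1 else 1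
    if run' ≥ 4 then total else calcBScan total xs prev' run'

def calcula_pontos_quadra_alt (lista : List Int) : Int :=
  calcBScan lista.sum (PySem.List.sorted lista (fun x => x) false) none 0

-- ===== PRECONDITION & SPEC =====
def Spec_calcula_pontos_quadra (lista : List Int) (out : Int) : Prop := out = calcula_pontos_quadra_alt lista
instance (lista : List Int) (out : Int) : Decidable (Spec_calcula_pontos_quadra lista out) := by unfold Spec_calcula_pontos_quadra; infer_instance

-- ===== CLAIM =====
def Claim_equal_calcula_pontos_quadra : Prop := ∀ (lista : List Int), Dom_calcula_pontos_quadra lista → Spec_calcula_pontos_quadra lista (calcula_pontos_quadra lista)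

-- ===== LEMMAS AND PROOFS =====

-- A's inner counting loop computes List.count.
theorem foldl_count_eq (lista : List Int) (dado : Int) (c : Int) :
    lista.foldl (fun c numero => if numero == dado then c + 1 else c) c = c + lista.count dado := by
  induction lista generalizing c with
  | nil => simp
  | cons x xs ih =>
    simp only [List.foldl_cons, List.count_cons, ih]
    by_cases h : x = dado <;> simp [h, add_comm, add_left_comm]

-- A's summing loop computes List.sum.
theorem foldl_sum_eq (lista : List Int) (s : Int) :
    lista.foldl (fun soma numero => soma + numero) s = s + lista.sum := by
  induction lista generalizing s with
  | nil => simp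
  | cons x xs ih => simp [List.foldl_cons, ih]; ring

-- Characterisation of A's outer loop.
theorem calcAOuter_eq (lista rem : List Int) :
    calcAOuter lista rem =
      if rem.any (fun d => (4 : Int) ≤ lista.count d) then lista.sum else 0 := by
  induction rem with
  | nil => simp [calcAOuter]
  | cons d rest ih =>
    simp only [calcAOuter, foldl_count_eq, foldl_sum_eq, zero_add, List.any_cons, ih]
    by_cases h : (4 : Int) ≤ lista.count d
    · simp [h, ge_iff_le]
    · simp [h, ge_iff_le]

-- Run-length scan on a sorted tail: with current value x (all elements of l are ≥ x)
-- and current run length 1 ≤ k ≤ 3, it returns total iff x's run completes to 4 or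
-- some later value has count ≥ 4.
theorem calcBScan_sorted (total : Int) (l : List Int) (x k : Int)
    (hs : l.Pairwise (· ≤ ·)) (hlb : ∀ y ∈ l, x ≤ y) (hk1 : 1 ≤ k) (hk3 : k ≤ 3) :
    calcBScan total l (some x) k =
      if (4 : Int) ≤ k + (l.count x : Int) ∨ ∃ y ∈ l, y ≠ x ∧ (4 : Int) ≤ (l.count y : Int)
      then total else 0 := by
  induction l generalizing x k with
  | nil =>
    simp only [calcBScan, List.count_nil]
    rw [if_neg]
    simp only [List.not_mem_nil, false_and, exists_false, or_false, not_le]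
    omega
  | cons y ys ih =>
    rcases List.pairwise_cons.mp hs with ⟨hy, hys⟩
    by_cases hxy : y = x
    · subst hxy
      simp only [calcBScan]
      have hc : k ≠ 0 ∧ True := ⟨by omega, trivial⟩
      rw [if_pos hc, if_pos hc]
      by_cases h4 : k + 1 ≥ 4
      · rw [if_pos h4, if_pos]
        left
        simp only [List.count_cons_self]
        push_cast; omega
      · rw [if_neg h4, ih y (k+1) hys hy (by omega) (by omega)]
        congr 1
        simp only [List.count_cons_self, eq_iff_iff]
        constructor
        · rintro (h | ⟨z, hz, hzx, hc⟩)
          · left; push_cast; omega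
          · right
            refine ⟨z, List.mem_cons_of_mem _ hz, hzx, ?_⟩
            rwa [List.count_cons_of_ne (Ne.symm hzx)]
        · rintro (h | ⟨z, hz, hzx, hc⟩)
          · left; push_cast at h ⊢; omega
          · rcases List.mem_cons.mp hz with rfl | hz'
            · exact absurd rfl hzx
            · right
              refine ⟨z, hz', hzx, ?_⟩
              rwa [List.count_cons_of_ne (Ne.symm hzx)] at hc
    · have hxy' : x < y := lt_of_le_of_ne (hlb y (List.mem_cons_self)) (fun h => hxy h.symm)
      have hxnot : ∀ z ∈ y :: ys, z ≠ x := by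
        intro z hz
        rcases List.mem_cons.mp hz with rfl | hz'
        · omega
        · have := hy z hz'; omega
      simp only [calcBScan]
      have hc : ¬(k ≠ 0 ∧ (some x : Option Int) = some y) := by
        rintro ⟨-, h⟩; exact hxy (Option.some.inj h).symm
      rw [if_neg hc, if_neg hc, if_neg (by omega : ¬ (1 : Int) ≥ 4)]
      rw [ih y 1 hys hy (by omega) (by omega)]
      congr 1
      simp only [eq_iff_iff]
      constructor
      · rintro (h | ⟨z, hz, hzy, hc⟩)
        · right
          refine ⟨y, List.mem_cons_self, hxnot y List.mem_cons_self, ?_⟩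
          simp only [List.count_cons_self]; push_cast at h ⊢; omega
        · right
          refine ⟨z, List.mem_cons_of_mem _ hz, hxnot z (List.mem_cons_of_mem _ hz), ?_⟩
          rwa [List.count_cons_of_ne (Ne.symm hzy)]
      · rintro (h | ⟨z, hz, hzx, hc⟩)
        · exfalso
          have : (y :: ys).count x = 0 := by
            rw [List.count_eq_zero]
            intro hmem; exact hxnot x hmem rfl
          rw [this] at h; push_cast at h; omega
        · rcases List.mem_cons.mp hz with rfl | hz'
          · left
            simp only [List.count_cons_self] at hc
            push_cast at hc ⊢; omega
          · by_cases hzy : z = y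
            · subst hzy
              left
              simp only [List.count_cons_self] at hc
              push_cast at hc ⊢; omega
            · right
              refine ⟨z, hz', hzy, ?_⟩
              rwa [List.count_cons_of_ne (Ne.symm hzy)] at hc

-- ===== VERDICT =====
theorem calcula_pontos_quadra_spec : Claim_equal_calcula_pontos_quadra := by
  intro lista _
  unfold Spec_calcula_pontos_quadra calcula_pontos_quadra calcula_pontos_quadra_alt
  rw [calcAOuter_eq]
  have hperm := PySem.List.sorted_perm lista (fun x => x) false
  have hsum : (PySem.List.sorted lista (fun x => x) false).sum = lista.sum := hperm.sum_eq
  have hcount : ∀ z, (PySem.List.sorted lista (fun x => x) false).count z = lista.count z :=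
    fun z => hperm.count_eq z
  have hmem : ∀ z, z ∈ PySem.List.sorted lista (fun x => x) false ↔ z ∈ lista :=
    fun z => hperm.mem_iff
  cases hS : PySem.List.sorted lista (fun x => x) false with
  | nil =>
    have hnil : lista = [] := by
      have := hperm; rw [hS] at this; exact (List.Perm.nil_eq this).symm
    simp [hnil, calcBScan]
  | cons h t =>
    have hsorted : (h :: t).Pairwise (· ≤ ·) := by
      have := PySem.List.sorted_pairwise lista (fun x => x)
      rwa [hS] at this
    rcases List.pairwise_cons.mp hsorted with ⟨hle, htp⟩
    simp only [calcBScan]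
    have hc0 : ¬((0:Int) ≠ 0 ∧ (none : Option Int) = some h) := by simp
    rw [if_neg hc0, if_neg hc0, if_neg (by omega : ¬ (1:Int) ≥ 4)]
    rw [calcBScan_sorted lista.sum t h 1 htp hle (by omega) (by omega)]
    rw [hS] at hsum hcount hmem
    rw [← hsum]
    congr 1
    · simp only [List.any_eq_true, decide_eq_true_eq, eq_iff_iff]
      constructor
      · rintro ⟨d, hd, hc⟩
        rw [← hcount d] at hc
        by_cases hdh : d = h
        · subst hdh
          left
          simp only [List.count_cons_self] at hc
          push_cast at hc ⊢; omega
        · right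
          have : d ∈ h :: t := (hmem d).mpr hd
          rcases List.mem_cons.mp this with rfl | hd'
          · exact absurd rfl hdh
          · refine ⟨d, hd', hdh, ?_⟩
            rw [List.count_cons_of_ne (Ne.symm hdh)] at hc
            exact hc
      · rintro (hc | ⟨z, hz, hzh, hc⟩)
        · refine ⟨h, (hmem h).mp List.mem_cons_self, ?_⟩
          rw [← hcount h]
          simp only [List.count_cons_self]
          push_cast at hc ⊢; omega
        · refine ⟨z, (hmem z).mp (List.mem_cons_of_mem _ hz), ?_⟩
          rw [← hcount z, List.count_cons_of_ne (Ne.symm hzh)]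
          exact hc
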